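-- pv_equiv track=rewrite | github.com/sunnyyeti/Leetcode-solutions | 1170_Compare_Strings_by_Frequency_of_the_Smallest_Character.py | f
-- ===== SOURCE A (Python) =====
-- def f(word):
--     sc = chr(ord('z')+1)
--     sn = 0
--     for c in word:
--         if c<sc:
--             sc=c
--             sn=1
--         elif c==sc:
--             sn+=1
--     return sn
-- ===== SOURCE B (Python) =====
-- def f(word):
--     if not word:
--         return 0
--     m = min(word)
--     return word.count(m)
-- ===== Notes on version B (the rewrite author's own statement) =====
-- stated objective: idiomatic
-- what changed: Replaces A's single fused min-and-count loop with its sentinel chr(ord('z')+1) by an empty guard plus two built-in scans: m = min(word), then word.count(m).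
-- intended difference: On nonempty words whose characters all have code points above 123, A's sentinel chr(ord('z')+1) is never beaten so A returns 0, while B returns the actual count of the smallest character, which is the intended value. — e.g. on f("~"): A returns 0, B returns 1
import Mathlib
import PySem

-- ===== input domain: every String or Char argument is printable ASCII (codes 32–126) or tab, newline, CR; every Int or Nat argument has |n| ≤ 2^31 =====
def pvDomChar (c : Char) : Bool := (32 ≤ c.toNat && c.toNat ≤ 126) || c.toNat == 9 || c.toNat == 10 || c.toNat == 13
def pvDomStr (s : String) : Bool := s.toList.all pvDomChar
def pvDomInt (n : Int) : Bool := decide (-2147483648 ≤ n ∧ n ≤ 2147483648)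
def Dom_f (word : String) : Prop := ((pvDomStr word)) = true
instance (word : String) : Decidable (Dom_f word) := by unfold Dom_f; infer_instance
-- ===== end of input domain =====

-- B replaces A's fused min-and-count loop (with its sentinel chr(ord('z')+1)) by an empty
-- guard plus two built-in scans: min(word), then word.count; return-value equivalence only.

-- ===== PORT A =====
-- one pass keeping (smallest char so far, its count); sc starts at chr(ord('z')+1) = '{'+0
def f (word : String) : Int :=
  (word.toList.foldl
    (fun (st : Char × Int) c =>
      if c < st.1 then (c, 1)
      else if c = st.1 then (st.1, st.2 + 1)
      else st)
    (Char.ofNat ('z'.toNat + 1), 0)).2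

-- ===== PORT B =====
-- if not word: return 0; m = min(word); return word.count(m)
def f_alt (word : String) : Int :=
  match PySem.List.min? word.toList (fun c => c) with
  | none => 0
  | some m => (PySem.Str.count word (String.ofList [m]) : Int)

-- ===== PRECONDITION & SPEC =====
-- On nonempty words whose characters all have code points above 123, A's sentinel
-- chr(ord('z')+1) is never beaten so A returns 0, while B returns the actual count of the
-- smallest character, which is the intended value.
def D_f (word : String) : Prop :=
  word.toList ≠ [] ∧ ∀ c ∈ word.toList, Char.ofNat 123 < c
instance (word : String) : Decidable (D_f word) := by unfold D_f; infer_instance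

def Spec_f (word : String) (out : Int) : Prop := ¬ D_f word → out = f_alt word
instance (word : String) (out : Int) : Decidable (Spec_f word out) := by unfold Spec_f; infer_instance

def pvDiffWitness_f : String := "~"
def pvDiffWitnessOut_f : Int × Int := (0, 1)

-- ===== CLAIM (what is proved, stated in full; the proofs are below) =====
def Claim_unchanged_f : Prop := ∀ (word : String), Dom_f word → Spec_f word (f word)
def Claim_changed_f : Prop := Dom_f (pvDiffWitness_f) ∧ D_f (pvDiffWitness_f) ∧ f (pvDiffWitness_f) = pvDiffWitnessOut_f.1 ∧ f_alt (pvDiffWitness_f) = pvDiffWitnessOut_f.2 ∧ pvDiffWitnessOut_f.1 ≠ pvDiffWitnessOut_f.2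
def Claim_exact_f : Prop := ∀ (word : String), Dom_f word → D_f word → f word ≠ f_alt word

-- ===== LEMMAS AND PROOFS =====

-- Python's str.count with a one-character needle counts occurrences of that character.
theorem go_singleton (m : Char) (l : List Char) : ∀ (fuel acc : Nat), l.length ≤ fuel →
    PySem.Chars.count.go [m] fuel l acc = acc + l.count m := by
  induction l with
  | nil =>
    intro fuel acc _
    cases fuel <;> simp [PySem.Chars.count.go]
  | cons h t ih =>
    intro fuel acc hf
    cases fuel with
    | zero => simp at hf
    | succ f =>
      have hf' : t.length ≤ f := by simpa using hf
      by_cases hm : m = h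
      · subst hm
        simp [PySem.Chars.count.go, List.isPrefixOf, ih f (acc + 1) hf']
        omega
      · have : (m == h) = false := by simp [hm]
        simp [PySem.Chars.count.go, List.isPrefixOf, this, ih f acc hf', Ne.symm hm]

theorem count_singleton (s : String) (m : Char) :
    PySem.Str.count s (String.ofList [m]) = s.toList.count m := by
  have h := go_singleton m s.toList s.toList.length 0 (le_refl _)
  have htl : (String.ofList [m]).toList = [m] := String.toList_ofList
  simp [PySem.Str.count, PySem.Chars.count, htl]
  simpa using h

theorem foldl_min_shift (t : List Char) : ∀ (a b : Char),
    t.foldl min (min a b) = min a (t.foldl min b) := by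
  induction t with
  | nil => intro a b; rfl
  | cons c t ih =>
    intro a b
    simp only [List.foldl_cons, min_assoc, ih]

theorem foldl_min_le_init (t : List Char) : ∀ (a : Char), t.foldl min a ≤ a := by
  induction t with
  | nil => intro a; exact le_refl a
  | cons c t ih =>
    intro a
    exact le_trans (ih (min a c)) (min_le_left a c)

-- Characterisation of A's loop: final smallest = running min, final count = its count in the
-- suffix (plus the carried count when the smallest never improves).
theorem loop_char (l : List Char) : ∀ (sc : Char) (sn : Int),
    l.foldl
      (fun (st : Char × Int) c =>
        if c < st.1 then (c, 1)
        else if c = st.1 then (st.1, st.2 + 1)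
        else st)
      (sc, sn)
    = (l.foldl min sc,
       (if l.foldl min sc = sc then sn else 0) + (l.count (l.foldl min sc) : Int)) := by
  induction l with
  | nil => intro sc sn; simp
  | cons c t ih =>
    intro sc sn
    by_cases h1 : c < sc
    · have hmin : min sc c = c := min_eq_right (le_of_lt h1)
      have hM : t.foldl min c ≠ sc := by
        have := foldl_min_le_init t c
        exact ne_of_lt (lt_of_le_of_lt this h1)
      simp only [List.foldl_cons, h1, if_true, hmin, ih c 1, hM, if_false]
      rw [Prod.mk.injEq]
      refine ⟨rfl, ?_⟩
      · rw [List.count_cons]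
        by_cases hc : t.foldl min c = c
        · simp [hc]; ring
        · have : (c == t.foldl min c) = false := by
            simp [Ne.symm hc]
          simp [this, hc]
    · have hle : sc ≤ c := le_of_not_gt h1
      have hmin : min sc c = sc := min_eq_left hle
      by_cases h2 : c = sc
      · subst h2
        simp only [List.foldl_cons, h1, if_false, if_true, hmin, ih c (sn + 1)]
        rw [Prod.mk.injEq]
        refine ⟨rfl, ?_⟩
        · rw [List.count_cons]
          by_cases hc : t.foldl min c = c
          · simp [hc]; ring
          · have : (c == t.foldl min c) = false := by simp [Ne.symm hc]
            simp [this, hc]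
      · have hlt : sc < c := lt_of_le_of_ne hle (Ne.symm h2)
        have hM : t.foldl min sc ≠ c := by
          have := foldl_min_le_init t sc
          exact ne_of_lt (lt_of_le_of_lt this hlt)
        simp only [List.foldl_cons, h1, if_false, h2, hmin, ih sc sn]
        rw [Prod.mk.injEq]
        refine ⟨rfl, ?_⟩
        · rw [List.count_cons]
          have : (c == t.foldl min sc) = false := by simp [Ne.symm hM]
          simp [this]

theorem f_eq_count (word : String) :
    f word = (word.toList.count (word.toList.foldl min (Char.ofNat 123)) : Int) := by
  unfold f
  rw [loop_char]
  split_ifs <;> simp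

theorem f_alt_nil (word : String) (hl : word.toList = []) : f_alt word = 0 := by
  unfold f_alt
  rw [hl]
  rfl

theorem f_alt_cons (word : String) (x : Char) (t : List Char) (hl : word.toList = x :: t) :
    f_alt word = (word.toList.count (t.foldl min x) : Int) := by
  unfold f_alt
  rw [hl]
  rw [PySem.List.min?_id_cons]
  show ((PySem.Str.count word (String.ofList [t.foldl min x]) : Nat) : Int) = _
  rw [count_singleton, hl]

theorem min_mem_isMin (x : Char) (t : List Char) :
    t.foldl min x ∈ (x :: t) ∧ ∀ y ∈ (x :: t), t.foldl min x ≤ y := by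
  constructor
  · have := PySem.List.min?_mem (xs := x :: t) (key := fun y => y)
      (m := t.foldl min x) (PySem.List.min?_id_cons x t)
    simpa using this
  · intro y hy
    have := PySem.List.min?_isMin (xs := x :: t) (key := fun y => y)
      (m := t.foldl min x) (PySem.List.min?_id_cons x t)
    simpa using this y hy

-- ===== VERDICT (by name: the statement is the Claim_ definition above) =====
theorem f_spec : Claim_unchanged_f := by
  intro word _ hD
  cases hl : word.toList with
  | nil =>
    rw [f_eq_count, f_alt_nil word hl, hl]
    simp
  | cons x t =>
    rw [f_eq_count, f_alt_cons word x t hl, hl]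
    have hsh : (x :: t).foldl min (Char.ofNat 123) = min (Char.ofNat 123) (t.foldl min x) := by
      simpa using foldl_min_shift t (Char.ofNat 123) x
    have hm : t.foldl min x ≤ Char.ofNat 123 := by
      by_contra hgt
      replace hgt := not_le.mp hgt
      apply hD
      refine ⟨by rw [hl]; simp, ?_⟩
      intro c hc
      rw [hl] at hc
      exact lt_of_lt_of_le hgt ((min_mem_isMin x t).2 c hc)
    rw [hsh, min_eq_right hm]

theorem f_changed : Claim_changed_f := by
  unfold Claim_changed_f
  have h : pvDiffWitness_f.toList = ['~'] := by decide
  refine ⟨?_, ?_, ?_, ?_, by decide⟩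
  · simp [Dom_f, pvDomStr, pvDomChar, h]
  · refine ⟨by simp [h], ?_⟩
    intro c hc
    rw [h] at hc
    simp at hc
    subst hc
    decide
  · simp [f, h, pvDiffWitnessOut_f]
  · rw [f_alt_cons pvDiffWitness_f '~' [] h, h]
    simp [pvDiffWitnessOut_f]

theorem f_tight : Claim_exact_f := by
  intro word _ hD
  obtain ⟨hne, hall⟩ := hD
  cases hl : word.toList with
  | nil => exact absurd hl hne
  | cons x t =>
    rw [f_eq_count, f_alt_cons word x t hl, hl]
    have hzero : (x :: t).count ((x :: t).foldl min (Char.ofNat 123)) = 0 := by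
      rw [List.count_eq_zero]
      intro hmem
      have h1 := foldl_min_le_init (x :: t) (Char.ofNat 123)
      have hmem' : (x :: t).foldl min (Char.ofNat 123) ∈ word.toList := by
        rw [hl]; exact hmem
      exact absurd h1 (not_le.mpr (hall _ hmem'))
    have hpos : 0 < (x :: t).count (t.foldl min x) :=
      List.count_pos_iff.mpr (min_mem_isMin x t).1
    rw [hzero]
    intro h
    omega
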